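-- pv_equiv track=rewrite | github.com/gaurav-madkaikar/ABACQueueingModel | client-server-model/server/gen_test_data.py | resolveAccessRequestfromPolicy
-- ===== SOURCE A (Python) =====
-- def resolveAccessRequestfromPolicy(access_request, policy):
--     # result = 0 implies access not granted, result = 1 implies access granted
--     result = 0
--
--     # Process the result
--     for i in range(len(policy)):
--         key = "rule_" + str(i + 1)
--         rule = policy.get(key)
--
--         sub_attr_check = 1
--         for attr in access_request["sub"]:
--             if access_request["sub"][attr] == ['*']:
--                 continue
--             curr_sub_attr_check = 0
--             for value in access_request["sub"][attr]:
--                 if value == policy["sub"][attr]: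
--                     curr_sub_attr_check = 1
--                     break
--             if curr_sub_attr_check == 0:
--                 sub_attr_check = 0
--                 break
--         if sub_attr_check == 0:
--             continue
--         obj_attr_check = 1
--         for attr in access_request["obj"]:
--             if access_request["obj"][attr] == ['*']:
--                 continue
--             curr_obj_attr_check = 0
--             for values in access_request["obj"][attr]:
--                 if values == policy["obj"][attr]:
--                     curr_obj_attr_check = 1
--                     break
--             if curr_obj_attr_check == 0:
--                 obj_attr_check = 0
--                 break
--
--         if obj_attr_check == 0:
--             continue
--         else:
--             result = 1
--             break
--
--     # Return the result
--     return result
-- ===== SOURCE B (Python) =====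
-- def resolveAccessRequestfromPolicy(access_request, policy):
--     # result = 0 implies access not granted, result = 1 implies access granted
--     if not policy:
--         return 0
--
--     def satisfies(req_attrs, pol_attrs):
--         # every non-wildcard requested attribute must admit the policy's value
--         return all(vals == ['*'] or pol_attrs.get(attr) in vals
--                    for attr, vals in req_attrs.items())
--
--     if not satisfies(access_request["sub"], policy["sub"]):
--         return 0
--     return 1 if satisfies(access_request["obj"], policy["obj"]) else 0
-- ===== Notes on version B (the rewrite author's own statement) =====
-- stated objective: simpler
-- what changed: Drops A's outer for-loop over range(len(policy)) (every iteration computes the identical checks on the same 'sub'/'obj' dicts) and the hand-rolled flag/break nesting, replacing them with one guard for the empty policy plus an all()-based match helper applied once to 'sub' and then to 'obj'.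
-- outside the precondition, e.g. on resolveAccessRequestfromPolicy({'sub': {'a': ['*']}, 'obj': {}}, {'sub': {}}): A returns 1, B raises KeyError
import Mathlib
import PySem

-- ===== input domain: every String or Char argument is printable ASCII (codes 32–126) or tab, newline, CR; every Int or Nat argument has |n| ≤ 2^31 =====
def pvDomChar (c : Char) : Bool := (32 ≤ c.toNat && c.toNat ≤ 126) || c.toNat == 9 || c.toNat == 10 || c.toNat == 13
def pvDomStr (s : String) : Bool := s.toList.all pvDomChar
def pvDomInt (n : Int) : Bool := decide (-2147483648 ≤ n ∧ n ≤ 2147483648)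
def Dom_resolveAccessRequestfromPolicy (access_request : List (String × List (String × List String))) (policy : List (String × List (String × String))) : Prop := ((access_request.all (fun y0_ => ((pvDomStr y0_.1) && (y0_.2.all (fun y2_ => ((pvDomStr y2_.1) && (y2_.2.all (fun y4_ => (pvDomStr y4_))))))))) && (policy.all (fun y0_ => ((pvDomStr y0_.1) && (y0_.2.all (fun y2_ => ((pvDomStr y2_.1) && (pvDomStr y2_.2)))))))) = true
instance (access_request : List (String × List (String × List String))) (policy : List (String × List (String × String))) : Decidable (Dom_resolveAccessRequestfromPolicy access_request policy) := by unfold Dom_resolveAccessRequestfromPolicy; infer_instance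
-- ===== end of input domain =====

-- B drops A's outer loop (whose iterations are all identical) and decides the grant once with an
-- `all`-style match helper; objective: simpler/faster. Equivalence is about the return value only.

-- ===== PORT A =====
-- inner 'for value in vals: if value == p: curr = 1; break' loop, as the value it leaves in curr
def pvCurrCheck (vals : List String) (p : String) : Int :=
  match vals with
  | [] => 0
  | v :: rest => if v = p then 1 else pvCurrCheck rest p

-- 'for attr in req: …' attribute loop of A (sub_attr_check / obj_attr_check), over the key list
def pvAttrCheck (attrs : List String) (req : List (String × List String)) (pol : List (String × String)) : Int :=
  match attrs with
  | [] => 1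
  | a :: rest =>
    let vals := (PySem.Dict.mk req).getD a []
    if vals = ["*"] then pvAttrCheck rest req pol
    else if pvCurrCheck vals ((PySem.Dict.mk pol).getD a "") = 0 then 0
    else pvAttrCheck rest req pol

-- 'for i in range(len(policy)): …' with result/break; i is the running Python index
-- (getD stands in for d[k]: Pre_ excludes every input where Python would raise KeyError)
def pvLoopA (access_request : List (String × List (String × List String))) (policy : List (String × List (String × String))) (n i : Nat) : Int :=
  match n with
  | 0 => 0
  | Nat.succ m =>
    let _key := "rule_" ++ PySem.Int.toStr ((i : Int) + 1)
    let _rule := (PySem.Dict.mk policy).get? _key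
    let rs := (PySem.Dict.mk access_request).getD "sub" []
    let ps := (PySem.Dict.mk policy).getD "sub" []
    let subCheck := pvAttrCheck (PySem.Dict.keys (PySem.Dict.mk rs)) rs ps
    if subCheck = 0 then pvLoopA access_request policy m (i + 1)
    else
      let ro := (PySem.Dict.mk access_request).getD "obj" []
      let po := (PySem.Dict.mk policy).getD "obj" []
      let objCheck := pvAttrCheck (PySem.Dict.keys (PySem.Dict.mk ro)) ro po
      if objCheck = 0 then pvLoopA access_request policy m (i + 1)
      else 1

def resolveAccessRequestfromPolicy (access_request : List (String × List (String × List String))) (policy : List (String × List (String × String))) : Int :=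
  pvLoopA access_request policy policy.length 0

-- ===== PORT B =====
-- all(vals == ['*'] or pol_attrs.get(attr) in vals for attr, vals in req_attrs.items())
def pvSatisfies (req : List (String × List String)) (pol : List (String × String)) : Bool :=
  req.all (fun p =>
    p.2 == ["*"] ||
    (match (PySem.Dict.mk pol).get? p.1 with
     | none => false
     | some v => p.2.contains v))

def resolveAccessRequestfromPolicy_alt (access_request : List (String × List (String × List String))) (policy : List (String × List (String × String))) : Int :=
  if policy = [] then 0
  else
    let rs := (PySem.Dict.mk access_request).getD "sub" []
    let ps := (PySem.Dict.mk policy).getD "sub" []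
    if !(pvSatisfies rs ps) then 0
    else
      let ro := (PySem.Dict.mk access_request).getD "obj" []
      let po := (PySem.Dict.mk policy).getD "obj" []
      if pvSatisfies ro po then 1 else 0

-- ===== PRECONDITION & SPEC =====
-- helper for Pre_: every requested attribute whose value list is neither ['*'] nor [] is present in the policy dict
def pvKeysOK (req : List (String × List String)) (pol : List (String × String)) : Bool :=
  req.all (fun p => p.2 == ["*"] || p.2 == ([] : List String) || ((PySem.Dict.mk pol).get? p.1).isSome)

-- Pre_ helpers: pvQPass = this requested attribute accepts the policy's value (wildcard or member);
-- pvPFail = it rejects it without A needing a missing key; pvFailsFirst = scanning the request dict in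
-- order, a rejecting attribute comes before any attribute that would make A touch a missing policy key.
def pvQPass (ps : List (String × String)) (p : String × List String) : Bool :=
  p.2 == ["*"] ||
  (match (PySem.Dict.mk ps).get? p.1 with
   | none => false
   | some v => p.2.contains v)

def pvPFail (ps : List (String × String)) (p : String × List String) : Bool :=
  !(p.2 == ["*"]) &&
  (p.2 == ([] : List String) ||
   (match (PySem.Dict.mk ps).get? p.1 with
    | none => false
    | some v => !(p.2.contains v)))

def pvFailsFirst (req : List (String × List String)) (ps : List (String × String)) : Bool :=
  match req with
  | [] => false
  | p :: rest => pvPFail ps p || (pvQPass ps p && pvFailsFirst rest ps)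

-- Pre_ excludes (a) inputs on which A raises KeyError, (b) inputs on which A returns only because a
-- rejecting or all-wildcard check stops it before it would touch a missing "sub"/"obj" entry that B
-- reads unconditionally (B raises KeyError there), and (c) assoc lists whose request "sub"/"obj" keys
-- repeat, which no Python dict can represent.
def Pre_resolveAccessRequestfromPolicy (access_request : List (String × List (String × List String))) (policy : List (String × List (String × String))) : Prop :=
  policy = [] ∨
  ( ((PySem.Dict.mk access_request).get? "sub").isSome ∧
    ((PySem.Dict.mk policy).get? "sub").isSome ∧
    (((PySem.Dict.mk access_request).getD "sub" []).map Prod.fst).Nodup ∧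
    pvFailsFirst ((PySem.Dict.mk access_request).getD "sub" []) ((PySem.Dict.mk policy).getD "sub" []) = true ) ∨
  ( ((PySem.Dict.mk access_request).get? "sub").isSome ∧
    ((PySem.Dict.mk access_request).get? "obj").isSome ∧
    ((PySem.Dict.mk policy).get? "sub").isSome ∧
    ((PySem.Dict.mk policy).get? "obj").isSome ∧
    (((PySem.Dict.mk access_request).getD "sub" []).map Prod.fst).Nodup ∧
    (((PySem.Dict.mk access_request).getD "obj" []).map Prod.fst).Nodup ∧
    ((PySem.Dict.mk access_request).getD "sub" []).all (pvQPass ((PySem.Dict.mk policy).getD "sub" [])) = true ∧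
    pvFailsFirst ((PySem.Dict.mk access_request).getD "obj" []) ((PySem.Dict.mk policy).getD "obj" []) = true ) ∨
  ( ((PySem.Dict.mk access_request).get? "sub").isSome ∧
    ((PySem.Dict.mk access_request).get? "obj").isSome ∧
    ((PySem.Dict.mk policy).get? "sub").isSome ∧
    ((PySem.Dict.mk policy).get? "obj").isSome ∧
    pvKeysOK ((PySem.Dict.mk access_request).getD "sub" []) ((PySem.Dict.mk policy).getD "sub" []) = true ∧
    pvKeysOK ((PySem.Dict.mk access_request).getD "obj" []) ((PySem.Dict.mk policy).getD "obj" []) = true ∧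
    (((PySem.Dict.mk access_request).getD "sub" []).map Prod.fst).Nodup ∧
    (((PySem.Dict.mk access_request).getD "obj" []).map Prod.fst).Nodup )
instance (access_request : List (String × List (String × List String))) (policy : List (String × List (String × String))) : Decidable (Pre_resolveAccessRequestfromPolicy access_request policy) := by unfold Pre_resolveAccessRequestfromPolicy; infer_instance

def pvWitness_resolveAccessRequestfromPolicy : (List (String × List (String × List String))) × (List (String × List (String × String))) :=
  ([("sub", [("role", ["admin", "user"])]), ("obj", [("type", ["*"])])],
   [("rule_1", []), ("sub", [("role", "admin")]), ("obj", [("type", "doc")])])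

def Spec_resolveAccessRequestfromPolicy (access_request : List (String × List (String × List String))) (policy : List (String × List (String × String))) (out : Int) : Prop := out = resolveAccessRequestfromPolicy_alt access_request policy
instance (access_request : List (String × List (String × List String))) (policy : List (String × List (String × String))) (out : Int) : Decidable (Spec_resolveAccessRequestfromPolicy access_request policy out) := by unfold Spec_resolveAccessRequestfromPolicy; infer_instance

-- ===== CLAIM (what is proved, stated in full; the proofs are below) =====
def Claim_equal_resolveAccessRequestfromPolicy : Prop := ∀ (access_request : List (String × List (String × List String))) (policy : List (String × List (String × String))), Dom_resolveAccessRequestfromPolicy access_request policy → Pre_resolveAccessRequestfromPolicy access_request policy → Spec_resolveAccessRequestfromPolicy access_request policy (resolveAccessRequestfromPolicy access_request policy)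

-- ===== LEMMAS AND PROOFS =====

theorem pvCurrCheck_eq (vals : List String) (p : String) :
    pvCurrCheck vals p = if vals.contains p then 1 else 0 := by
  induction vals with
  | nil => rfl
  | cons v rest ih =>
    simp only [pvCurrCheck, List.contains_cons]
    by_cases h : v = p
    · simp [h]
    · simp [h, ih, Ne.symm h]

-- one step of A's attribute loop, as a Bool on a single key
def pvPass (req : List (String × List String)) (pol : List (String × String)) (a : String) : Bool :=
  let vals := (PySem.Dict.mk req).getD a []
  vals == ["*"] || vals.contains ((PySem.Dict.mk pol).getD a "")

theorem pvAttrCheck_eq (attrs : List String) (req : List (String × List String)) (pol : List (String × String)) :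
    pvAttrCheck attrs req pol = if attrs.all (pvPass req pol) then 1 else 0 := by
  induction attrs with
  | nil => rfl
  | cons a rest ih =>
    simp only [pvAttrCheck, List.all_cons, pvPass, pvCurrCheck_eq]
    by_cases hstar : (PySem.Dict.mk req).getD a [] = ["*"]
    · simp [hstar, ih]
    · by_cases hc : (PySem.Dict.mk pol).getD a "" ∈ (PySem.Dict.mk req).getD a []
      · simp [hstar, hc, ih]
      · simp [hstar, hc]

theorem pvFailsFirst_exists (req : List (String × List String)) (ps : List (String × String))
    (h : pvFailsFirst req ps = true) : ∃ p ∈ req, pvPFail ps p = true := by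
  induction req with
  | nil => simp [pvFailsFirst] at h
  | cons p rest ih =>
    simp only [pvFailsFirst, Bool.or_eq_true, Bool.and_eq_true] at h
    rcases h with h | ⟨_, h⟩
    · exact ⟨p, List.mem_cons_self, h⟩
    · obtain ⟨q, hq, hfq⟩ := ih h
      exact ⟨q, List.mem_cons_of_mem _ hq, hfq⟩

theorem pvGetD_of_mem (req : List (String × List String)) (p : String × List String)
    (hnd : (req.map Prod.fst).Nodup) (hp : p ∈ req) :
    (PySem.Dict.mk req).getD p.1 [] = p.2 := by
  apply PySem.Dict.getD_of_mem_items (d := PySem.Dict.mk req) (k := p.1) (v := p.2)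
  · exact hp
  · simpa [PySem.Dict.keys] using hnd

theorem pvPass_false_of_pfail (req : List (String × List String)) (ps : List (String × String))
    (p : String × List String) (hnd : (req.map Prod.fst).Nodup) (hp : p ∈ req)
    (hf : pvPFail ps p = true) : pvPass req ps p.1 = false := by
  simp only [pvPass, pvGetD_of_mem req p hnd hp]
  rw [pvPFail] at hf
  cases hpol : (PySem.Dict.mk ps).get? p.1 with
  | some v =>
    rw [hpol] at hf
    simp only [PySem.Dict.getD_eq_get?_getD, hpol, Option.getD_some]
    simp only [Bool.and_eq_true, Bool.or_eq_true, beq_iff_eq, Bool.not_eq_true',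
      beq_eq_false_iff_ne, ne_eq] at hf
    obtain ⟨hstar, hf⟩ := hf
    rcases hf with h | h
    · simp [h]
    · simp at h
      simp [hstar, h]
  | none =>
    rw [hpol] at hf
    simp only [Bool.and_eq_true, Bool.or_eq_true, beq_iff_eq, Bool.not_eq_true',
      beq_eq_false_iff_ne, ne_eq] at hf
    obtain ⟨hstar, hf⟩ := hf
    rcases hf with h | h
    · simp [h]
    · simp at h

theorem pvSatisfies_eq_all_qpass (req : List (String × List String)) (ps : List (String × String)) :
    pvSatisfies req ps = req.all (pvQPass ps) := rfl

theorem pvQPass_false_of_pfail (ps : List (String × String)) (p : String × List String)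
    (hf : pvPFail ps p = true) : pvQPass ps p = false := by
  rw [pvPFail] at hf
  rw [pvQPass]
  cases hpol : (PySem.Dict.mk ps).get? p.1 with
  | some v =>
    rw [hpol] at hf
    simp only [Bool.and_eq_true, Bool.or_eq_true, beq_iff_eq, Bool.not_eq_true',
      beq_eq_false_iff_ne, ne_eq] at hf
    obtain ⟨hstar, hf⟩ := hf
    rcases hf with h | h
    · simp [h]
    · simp at h
      simp [hstar, h]
  | none =>
    rw [hpol] at hf
    simp only [Bool.and_eq_true, Bool.or_eq_true, beq_iff_eq, Bool.not_eq_true',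
      beq_eq_false_iff_ne, ne_eq] at hf
    simp [hf.1]

theorem pvPass_true_of_qpass (req : List (String × List String)) (ps : List (String × String))
    (p : String × List String) (hnd : (req.map Prod.fst).Nodup) (hp : p ∈ req)
    (hq : pvQPass ps p = true) : pvPass req ps p.1 = true := by
  simp only [pvPass, pvGetD_of_mem req p hnd hp]
  simp only [pvQPass, Bool.or_eq_true, beq_iff_eq] at hq
  rcases hq with h | h
  · simp [h]
  · cases hpol : (PySem.Dict.mk ps).get? p.1 with
    | some v =>
      rw [hpol] at h
      simp at h
      simp [PySem.Dict.getD_eq_get?_getD, hpol, h]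
    | none => rw [hpol] at h; simp at h

-- over the request's own key list, A's per-attribute pass agrees with B's match, given Pre_'s facts
theorem pvAll_pass_eq_satisfies (req : List (String × List String)) (pol : List (String × String))
    (hnd : (req.map Prod.fst).Nodup) (hok : pvKeysOK req pol = true) :
    (req.map Prod.fst).all (pvPass req pol) = pvSatisfies req pol := by
  rw [List.all_map, pvSatisfies, Bool.eq_iff_iff, List.all_eq_true, List.all_eq_true]
  refine forall_congr' (fun p => forall_congr' (fun hp => ?_))
  have hget : (PySem.Dict.mk req).getD p.1 [] = p.2 := by
    apply PySem.Dict.getD_of_mem_items (d := PySem.Dict.mk req) (k := p.1) (v := p.2)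
    · exact hp
    · simpa [PySem.Dict.keys] using hnd
  simp only [Function.comp, pvPass, hget]
  cases hpol : (PySem.Dict.mk pol).get? p.1 with
  | some v =>
    simp [PySem.Dict.getD_eq_get?_getD, hpol]
  | none =>
    simp only [PySem.Dict.getD_eq_get?_getD, hpol, Option.getD_none]
    rw [pvKeysOK, List.all_eq_true] at hok
    have := hok p hp
    simp only [hpol, Bool.or_eq_true, beq_iff_eq, Option.isSome_none] at this ⊢
    rcases this with h | h
    · rcases h with h | h <;> simp [h]
    · simp at h

-- the single value A's loop body computes (independent of n and i)
def pvBodyA (access_request : List (String × List (String × List String))) (policy : List (String × List (String × String))) : Int :=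
  let rs := (PySem.Dict.mk access_request).getD "sub" []
  let ps := (PySem.Dict.mk policy).getD "sub" []
  if pvAttrCheck (PySem.Dict.keys (PySem.Dict.mk rs)) rs ps = 0 then 0
  else
    let ro := (PySem.Dict.mk access_request).getD "obj" []
    let po := (PySem.Dict.mk policy).getD "obj" []
    if pvAttrCheck (PySem.Dict.keys (PySem.Dict.mk ro)) ro po = 0 then 0
    else 1

theorem pvLoopA_eq (access_request : List (String × List (String × List String))) (policy : List (String × List (String × String))) :
    ∀ (n i : Nat), pvLoopA access_request policy n i = if n = 0 then 0 else pvBodyA access_request policy := by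
  intro n
  induction n with
  | zero => intro i; rfl
  | succ m ih =>
    intro i
    simp only [pvLoopA, pvBodyA, ih (i + 1)]
    split_ifs <;> simp_all

-- ===== VERDICT =====
theorem resolveAccessRequestfromPolicy_spec : Claim_equal_resolveAccessRequestfromPolicy := by
  intro ar pol _ hpre
  unfold Spec_resolveAccessRequestfromPolicy
  have hkeys : ∀ (r : List (String × List String)), PySem.Dict.keys (PySem.Dict.mk r) = r.map Prod.fst :=
    fun r => rfl
  have hne : ∀ (_ : ((PySem.Dict.mk pol).get? "sub").isSome = true), pol ≠ [] := by
    rintro h rfl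
    simp [PySem.Dict.get?] at h
  rcases hpre with hnil | ⟨_, hps2, hnd2, hff2⟩ | ⟨_, _, hps3, _, hnds3, hndo3, hq3, hff3⟩ |
    ⟨_, _, hps, _, hoks, hoko, hnds, hndo⟩
  · subst hnil; rfl
  · -- the sub check rejects, for both programs, before any missing-key trouble
    have hpol := hne hps2
    unfold resolveAccessRequestfromPolicy resolveAccessRequestfromPolicy_alt
    rw [pvLoopA_eq]
    have hlen : pol.length ≠ 0 := by simp [List.length_eq_zero_iff, hpol]
    rw [if_neg hlen, if_neg hpol]
    unfold pvBodyA
    obtain ⟨p, hp, hf⟩ := pvFailsFirst_exists _ _ hff2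
    have hall : (((PySem.Dict.mk ar).getD "sub" []).map Prod.fst).all
        (pvPass ((PySem.Dict.mk ar).getD "sub" []) ((PySem.Dict.mk pol).getD "sub" [])) = false := by
      rw [List.all_eq_false]
      exact ⟨p.1, List.mem_map_of_mem hp, by simp [pvPass_false_of_pfail _ _ p hnd2 hp hf]⟩
    have hsat : pvSatisfies ((PySem.Dict.mk ar).getD "sub" []) ((PySem.Dict.mk pol).getD "sub" []) = false := by
      rw [pvSatisfies_eq_all_qpass, List.all_eq_false]
      exact ⟨p, hp, by simp [pvQPass_false_of_pfail _ p hf]⟩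
    simp [hkeys, pvAttrCheck_eq, hall, hsat]
  · -- the sub check passes for both, and the obj check rejects for both before any trouble
    have hpol := hne hps3
    unfold resolveAccessRequestfromPolicy resolveAccessRequestfromPolicy_alt
    rw [pvLoopA_eq]
    have hlen : pol.length ≠ 0 := by simp [List.length_eq_zero_iff, hpol]
    rw [if_neg hlen, if_neg hpol]
    unfold pvBodyA
    have hallsub : (((PySem.Dict.mk ar).getD "sub" []).map Prod.fst).all
        (pvPass ((PySem.Dict.mk ar).getD "sub" []) ((PySem.Dict.mk pol).getD "sub" [])) = true := by
      rw [List.all_eq_true]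
      intro x hx
      obtain ⟨p, hp, rfl⟩ := List.mem_map.mp hx
      rw [List.all_eq_true] at hq3
      exact pvPass_true_of_qpass _ _ p hnds3 hp (hq3 p hp)
    obtain ⟨p, hp, hf⟩ := pvFailsFirst_exists _ _ hff3
    have hallobj : (((PySem.Dict.mk ar).getD "obj" []).map Prod.fst).all
        (pvPass ((PySem.Dict.mk ar).getD "obj" []) ((PySem.Dict.mk pol).getD "obj" [])) = false := by
      rw [List.all_eq_false]
      exact ⟨p.1, List.mem_map_of_mem hp, by simp [pvPass_false_of_pfail _ _ p hndo3 hp hf]⟩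
    have hsato : pvSatisfies ((PySem.Dict.mk ar).getD "obj" []) ((PySem.Dict.mk pol).getD "obj" []) = false := by
      rw [pvSatisfies_eq_all_qpass, List.all_eq_false]
      exact ⟨p, hp, by simp [pvQPass_false_of_pfail _ p hf]⟩
    have hsats : pvSatisfies ((PySem.Dict.mk ar).getD "sub" []) ((PySem.Dict.mk pol).getD "sub" []) = true := by
      rw [pvSatisfies_eq_all_qpass]; exact hq3
    simp [hkeys, pvAttrCheck_eq, hallsub, hallobj, hsato, hsats]
  · have hpol : pol ≠ [] := by
      rintro rfl
      simp [PySem.Dict.get?] at hps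
    unfold resolveAccessRequestfromPolicy resolveAccessRequestfromPolicy_alt
    rw [pvLoopA_eq]
    have hlen : pol.length ≠ 0 := by simp [List.length_eq_zero_iff, hpol]
    rw [if_neg hlen, if_neg hpol]
    unfold pvBodyA
    simp only [hkeys, pvAttrCheck_eq,
      pvAll_pass_eq_satisfies _ _ hnds hoks, pvAll_pass_eq_satisfies _ _ hndo hoko]
    cases pvSatisfies ((PySem.Dict.mk ar).getD "sub" []) ((PySem.Dict.mk pol).getD "sub" []) <;>
      cases pvSatisfies ((PySem.Dict.mk ar).getD "obj" []) ((PySem.Dict.mk pol).getD "obj" []) <;>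
      simp
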